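-- pv_equiv track=rewrite | github.com/standardgalactic/alignment | analyze.py | summarize_clusters
-- ===== SOURCE A (Python) =====
-- from collections import Counter
--
-- def summarize_clusters(docs, labels, vocab, top_k=10):
--     clusters = {}
--     for i, label in enumerate(labels):
--         clusters.setdefault(label, []).append(docs[i])
--     return {
--         label: Counter(w for doc in members for w in doc).most_common(top_k)
--         for label, members in clusters.items()
--     }
-- ===== SOURCE B (Python) =====
-- def summarize_clusters(docs, labels, vocab, top_k=10):
--     # one flat pass: count (label, word) pairs in a single dict, remember label order;
--     # per-label results are then read off by filtering the flat table
--     pair_counts = {}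
--     label_order = {}
--     for i, label in enumerate(labels):
--         label_order[label] = None
--         for w in docs[i]:
--             key = (label, w)
--             pair_counts[key] = pair_counts.get(key, 0) + 1
--     k = top_k if top_k >= 0 else 0
--     out = {}
--     for label in label_order:
--         items = [(w, c) for (l, w), c in pair_counts.items() if l == label]
--         items.sort(key=lambda p: p[1], reverse=True)
--         out[label] = items[:k]
--     return out
-- ===== Notes on version B (the rewrite author's own statement) =====
-- stated objective: alternative
-- what changed: B drops A's per-label grouping (dict label -> list of member docs, then a Counter per group) and instead counts (label, word) PAIRS in one flat dict while recording label first-occurrence order; each cluster's top-k list is then read off by filtering the flat pair table by label and sorting by count descending (stable, matching Counter.most_common's tie order).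
import Mathlib
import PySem

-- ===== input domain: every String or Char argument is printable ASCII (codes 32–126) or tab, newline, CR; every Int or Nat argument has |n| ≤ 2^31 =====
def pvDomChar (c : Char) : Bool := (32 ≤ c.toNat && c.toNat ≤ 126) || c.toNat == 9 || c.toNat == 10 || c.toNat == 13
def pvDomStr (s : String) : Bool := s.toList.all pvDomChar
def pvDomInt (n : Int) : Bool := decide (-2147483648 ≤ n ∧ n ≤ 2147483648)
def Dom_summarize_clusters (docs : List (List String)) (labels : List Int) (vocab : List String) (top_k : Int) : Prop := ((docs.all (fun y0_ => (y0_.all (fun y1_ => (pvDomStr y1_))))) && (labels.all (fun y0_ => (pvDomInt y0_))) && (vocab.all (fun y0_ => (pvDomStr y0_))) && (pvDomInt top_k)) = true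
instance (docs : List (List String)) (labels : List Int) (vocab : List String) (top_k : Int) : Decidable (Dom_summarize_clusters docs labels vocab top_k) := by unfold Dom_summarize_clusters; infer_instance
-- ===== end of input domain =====

-- B replaces A's per-label grouping (label → list of member docs, counted per group at the end)
-- by ONE flat table counting (label, word) PAIRS plus a label-order dict; per-label results are
-- read off by filtering the flat table. Objective: alternative (different data structure, same cost).

-- ===== PORT A =====
def summarize_clusters (docs : List (List String)) (labels : List Int) (vocab : List String) (top_k : Int) : List (Int × List (String × Int)) :=
  -- clusters.setdefault(label, []).append(docs[i]); docs[i] ported as pyGetD (in range under Pre_)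
  let clusters : PySem.Dict Int (List (List String)) :=
    (PySem.List.enumerate labels).foldl
      (fun d p => d.insert p.2 (d.getD p.2 [] ++ [PySem.List.pyGetD docs p.1 []]))
      PySem.Dict.empty
  -- {label: Counter(w for doc in members for w in doc).most_common(top_k) …}
  -- most_common(k) = items sorted by count descending (stable), first k (negative k → none)
  clusters.items.map (fun q =>
    (q.1, (PySem.List.sorted (PySem.Dict.counter (q.2.flatMap (fun doc => doc))).items
            (fun p => p.2) true).take top_k.toNat))

-- ===== PORT B =====
def summarize_clusters_alt (docs : List (List String)) (labels : List Int) (vocab : List String) (top_k : Int) : List (Int × List (String × Int)) :=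
  -- one flat pass: pair_counts[(label, w)] = pair_counts.get((label, w), 0) + 1; label_order[label] = None
  let st : PySem.Dict (Int × String) Int × PySem.Dict Int Unit :=
    (PySem.List.enumerate labels).foldl
      (fun st p =>
        let order := st.2.insert p.2 ()
        let pair := (PySem.List.pyGetD docs p.1 []).foldl
          (fun d w => d.insert (p.2, w) (d.getD (p.2, w) 0 + 1)) st.1
        (pair, order))
      (PySem.Dict.empty, PySem.Dict.empty)
  -- k = top_k if top_k >= 0 else 0
  let k : Int := if 0 ≤ top_k then top_k else 0
  -- for label in label_order: filter the flat table, sort by count descending (stable), slice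
  st.2.keys.map (fun l =>
    (l, (PySem.List.sorted ((st.1.items.filter (fun q => q.1.1 == l)).map (fun q => (q.1.2, q.2)))
          (fun p => p.2) true).take k.toNat))

-- ===== PRECONDITION & SPEC =====
-- Pre_ excludes exactly the inputs where Python A raises IndexError: labels longer than docs (docs[i] out of range).
def Pre_summarize_clusters (docs : List (List String)) (labels : List Int) (vocab : List String) (top_k : Int) : Prop :=
  labels.length ≤ docs.length
instance (docs : List (List String)) (labels : List Int) (vocab : List String) (top_k : Int) : Decidable (Pre_summarize_clusters docs labels vocab top_k) := by unfold Pre_summarize_clusters; infer_instance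

def pvWitness_summarize_clusters : List (List String) × List Int × List String × Int :=
  ([["cat", "dog", "cat"], ["dog"]], [7, 7], ["cat"], 2)

def Spec_summarize_clusters (docs : List (List String)) (labels : List Int) (vocab : List String) (top_k : Int) (out : List (Int × List (String × Int))) : Prop := out = summarize_clusters_alt docs labels vocab top_k
instance (docs : List (List String)) (labels : List Int) (vocab : List String) (top_k : Int) (out : List (Int × List (String × Int))) : Decidable (Spec_summarize_clusters docs labels vocab top_k out) := by unfold Spec_summarize_clusters; infer_instance

-- ===== CLAIM (what is proved, stated in full; the proofs are below) =====
def Claim_equal_summarize_clusters : Prop := ∀ (docs : List (List String)) (labels : List Int) (vocab : List String) (top_k : Int), Dom_summarize_clusters docs labels vocab top_k → Pre_summarize_clusters docs labels vocab top_k → Spec_summarize_clusters docs labels vocab top_k (summarize_clusters docs labels vocab top_k)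

-- ===== LEMMAS AND PROOFS =====

-- the flat (label, word) pair stream B counts, and the word stream of one label
def pvPairs (docs : List (List String)) (es : List (Int × Int)) : List (Int × String) :=
  es.flatMap (fun p => (PySem.List.pyGetD docs p.1 []).map (fun w => (p.2, w)))

def pvWords (docs : List (List String)) (es : List (Int × Int)) (l : Int) : List String :=
  (es.filter (fun p => p.2 == l)).flatMap (fun p => PySem.List.pyGetD docs p.1 [])

-- B's fold over a pair state is the pair of the two independent folds
theorem pv_state (docs : List (List String)) (es : List (Int × Int))
    (d : PySem.Dict (Int × String) Int) (o : PySem.Dict Int Unit) :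
    es.foldl
      (fun st p =>
        ((PySem.List.pyGetD docs p.1 []).foldl
          (fun d w => d.insert (p.2, w) (d.getD (p.2, w) 0 + 1)) st.1,
         st.2.insert p.2 ())) (d, o)
    = (es.foldl (fun d p => (PySem.List.pyGetD docs p.1 []).foldl
          (fun d w => d.insert (p.2, w) (d.getD (p.2, w) 0 + 1)) d) d,
       es.foldl (fun o p => o.insert p.2 ()) o) := by
  induction es generalizing d o with
  | nil => rfl
  | cons p rest ih => simpa using ih _ _

-- B's nested counting loop is the flat counting loop over pvPairs
theorem pv_pair_fold (docs : List (List String)) (es : List (Int × Int))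
    (d : PySem.Dict (Int × String) Int) :
    es.foldl (fun d p => (PySem.List.pyGetD docs p.1 []).foldl
        (fun d w => d.insert (p.2, w) (d.getD (p.2, w) 0 + 1)) d) d
    = (pvPairs docs es).foldl (fun d x => d.insert x (d.getD x 0 + 1)) d := by
  induction es generalizing d with
  | nil => rfl
  | cons p rest ih =>
      simp only [pvPairs, List.flatMap_cons, List.foldl_append, List.foldl_cons, List.foldl_map]
      rw [ih]
      rfl

-- A's grouping loop: the member-doc list of each label
theorem pv_group_getD (docs : List (List String)) (es : List (Int × Int)) (c : Int)
    (d : PySem.Dict Int (List (List String))) :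
    (es.foldl (fun d p => d.insert p.2 (d.getD p.2 [] ++ [PySem.List.pyGetD docs p.1 []])) d).getD c []
    = d.getD c [] ++ (es.filter (fun p => p.2 == c)).map (fun p => PySem.List.pyGetD docs p.1 []) := by
  induction es generalizing d with
  | nil => simp
  | cons p rest ih =>
      simp only [List.foldl_cons, List.filter_cons]
      rw [ih]
      by_cases h : p.2 = c
      · subst h
        simp
      · simp [PySem.Dict.getD_insert, h, Ne.symm h, beq_iff_eq]

-- dedup (Set.ofList) commutes with filter
theorem pv_ofList_filter {α : Type} [BEq α] [LawfulBEq α] (xs : List α) (p : α → Bool) :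
    PySem.Set.ofList (xs.filter p) = (PySem.Set.ofList xs).filter p := by
  induction xs using List.reverseRecOn with
  | nil => rfl
  | append_singleton xs x ih =>
    by_cases hp : p x = true
    · have h1 : (xs ++ [x]).filter p = xs.filter p ++ [x] := by simp [List.filter_append, hp]
      rw [h1, PySem.Set.ofList_append_singleton, PySem.Set.ofList_append_singleton, ih]
      by_cases hm : x ∈ xs
      · have hmf : x ∈ (PySem.Set.ofList xs).filter p := by
          simp [List.mem_filter, PySem.Set.mem_ofList, hm, hp]
        rw [PySem.Set.add_of_mem hmf, PySem.Set.add_of_mem (by simpa [PySem.Set.mem_ofList] using hm)]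
      · have hx : x ∉ PySem.Set.ofList xs := by simpa [PySem.Set.mem_ofList] using hm
        have hxf : x ∉ (PySem.Set.ofList xs).filter p := fun h => hx (List.mem_of_mem_filter h)
        rw [PySem.Set.add_of_not_mem hxf, PySem.Set.add_of_not_mem hx, List.filter_append]
        simp [hp]
    · have h1 : (xs ++ [x]).filter p = xs.filter p := by simp [List.filter_append, hp]
      rw [h1, ih, PySem.Set.ofList_append_singleton]
      by_cases hm : x ∈ xs
      · rw [PySem.Set.add_of_mem (by simpa [PySem.Set.mem_ofList] using hm)]
      · rw [PySem.Set.add_of_not_mem (by simpa [PySem.Set.mem_ofList] using hm), List.filter_append]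
        simp [hp]

-- dedup commutes with tagging every word with a fixed label
theorem pv_ofList_map_pair (xs : List String) (l : Int) :
    PySem.Set.ofList (xs.map (fun w => (l, w))) = (PySem.Set.ofList xs).map (fun w => (l, w)) := by
  induction xs using List.reverseRecOn with
  | nil => rfl
  | append_singleton xs x ih =>
    have hmx : (xs ++ [x]).map (fun w => (l, w)) = xs.map (fun w => (l, w)) ++ [(l, x)] := by
      simp
    rw [hmx, PySem.Set.ofList_append_singleton, PySem.Set.ofList_append_singleton, ih]
    by_cases hm : x ∈ xs
    · rw [PySem.Set.add_of_mem (show x ∈ PySem.Set.ofList xs by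
            simpa [PySem.Set.mem_ofList] using hm),
          PySem.Set.add_of_mem (show (l, x) ∈ (PySem.Set.ofList xs).map (fun w => (l, w)) from
            List.mem_map_of_mem (by simpa [PySem.Set.mem_ofList] using hm))]
    · have hx : x ∉ PySem.Set.ofList xs := by simpa [PySem.Set.mem_ofList] using hm
      have h2 : (l, x) ∉ (PySem.Set.ofList xs).map (fun w => (l, w)) := by
        intro h
        rcases List.mem_map.mp h with ⟨a, ha, heq⟩
        have : a = x := congrArg Prod.snd heq
        exact hx (this ▸ ha)
      rw [PySem.Set.add_of_not_mem h2, PySem.Set.add_of_not_mem hx]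
      simp

-- the pairs with first component l are exactly the words of label l, tagged
theorem pv_pairs_filter (docs : List (List String)) (es : List (Int × Int)) (l : Int) :
    (pvPairs docs es).filter (fun q => q.1 == l)
    = (pvWords docs es l).map (fun w => (l, w)) := by
  induction es with
  | nil => rfl
  | cons p rest ih =>
    simp only [pvPairs, pvWords] at ih ⊢
    by_cases h : p.2 = l
    · subst h
      simp [List.flatMap_cons, List.filter_append, List.filter_map, Function.comp_def, ih,
        List.map_append]
    · simp [List.flatMap_cons, List.filter_append, List.filter_map, Function.comp_def, h, ih]

-- counting a tagged word among tagged words is counting the word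
theorem pv_count_map_pair (xs : List String) (l : Int) (w : String) :
    (xs.map (fun w => (l, w))).count (l, w) = xs.count w := by
  induction xs with
  | nil => rfl
  | cons a t ih => simp [List.count_cons, ih, beq_iff_eq, Prod.ext_iff]

-- counting a pair in the flat stream = counting the word in its label's stream
theorem pv_pairs_count (docs : List (List String)) (es : List (Int × Int)) (l : Int) (w : String) :
    (pvPairs docs es).count (l, w) = (pvWords docs es l).count w := by
  have h1 : ((pvPairs docs es).filter (fun q => q.1 == l)).count (l, w)
      = (pvPairs docs es).count (l, w) := List.count_filter (by simp)
  rw [← h1, pv_pairs_filter, pv_count_map_pair]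

-- B's per-label read-off from the flat counter equals Counter of the label's words
theorem pv_proj (docs : List (List String)) (es : List (Int × Int)) (l : Int) :
    ((PySem.Dict.counter (pvPairs docs es)).items.filter (fun q => q.1.1 == l)).map
        (fun q => (q.1.2, q.2))
    = (PySem.Dict.counter (pvWords docs es l)).items := by
  rw [PySem.Dict.items_counter, PySem.Dict.items_counter, List.filter_map, List.map_map]
  have hcomp : ((fun q : (Int × String) × Int => q.1.1 == l) ∘
        fun k => (k, ((pvPairs docs es).count k : Int))) = fun k : Int × String => k.1 == l := by
    funext k; rfl
  rw [hcomp, ← pv_ofList_filter, pv_pairs_filter, pv_ofList_map_pair, List.map_map]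
  apply List.map_congr_left
  intro w hw
  simp [Function.comp, pv_pairs_count]

-- the if in B's k only clamps negatives, which .toNat does anyway
theorem pv_k_toNat (top_k : Int) :
    (if (0:Int) ≤ top_k then top_k else 0).toNat = top_k.toNat := by
  split_ifs with h
  · rfl
  · omega

-- ===== VERDICT (by name: the statement is the Claim_ definition above) =====
theorem summarize_clusters_spec : Claim_equal_summarize_clusters := by
  intro docs labels vocab top_k _ _
  unfold Spec_summarize_clusters
  simp only [summarize_clusters, summarize_clusters_alt]
  rw [pv_state docs (PySem.List.enumerate labels) PySem.Dict.empty PySem.Dict.empty]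
  have hnodup : ((PySem.List.enumerate labels).foldl
      (fun d p => d.insert p.2 (d.getD p.2 [] ++ [PySem.List.pyGetD docs p.1 []]))
      PySem.Dict.empty).keys.Nodup :=
    PySem.Dict.nodup_keys_foldl_insert_key _ _ _ _ (by simp [PySem.Dict.keys_empty])
  have hkA : ((PySem.List.enumerate labels).foldl
      (fun d p => d.insert p.2 (d.getD p.2 [] ++ [PySem.List.pyGetD docs p.1 []]))
      PySem.Dict.empty).keys = PySem.Set.ofList labels := by
    rw [PySem.Dict.keys_foldl_insert_key]
    simp [PySem.Dict.keys_empty, PySem.List.map_snd_enumerate, PySem.Set.update_nil_left]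
  have hkB : ((PySem.List.enumerate labels).foldl
      (fun o p => o.insert p.2 ()) (PySem.Dict.empty : PySem.Dict Int Unit)).keys
      = PySem.Set.ofList labels := by
    rw [PySem.Dict.keys_foldl_insert_key]
    simp [PySem.Dict.keys_empty, PySem.List.map_snd_enumerate, PySem.Set.update_nil_left]
  dsimp only
  rw [pv_pair_fold, PySem.Dict.foldl_insert_getD_add_one_eq_counter,
    PySem.Dict.items_eq_map_keys _ hnodup ([] : List (List String)), hkA, hkB, List.map_map]
  apply List.map_congr_left
  intro l hl
  simp only [Function.comp_apply]
  have hflat : ∀ ms : List (Int × Int),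
      (ms.map (fun p => PySem.List.pyGetD docs p.1 [])).flatMap (fun doc => doc)
      = ms.flatMap (fun p => PySem.List.pyGetD docs p.1 []) := by
    intro ms
    induction ms with
    | nil => rfl
    | cons a t ih => simp [List.flatMap_cons, ih]
  rw [pv_group_getD docs (PySem.List.enumerate labels) l PySem.Dict.empty,
    PySem.Dict.getD_empty, List.nil_append,
    hflat ((PySem.List.enumerate labels).filter (fun p => p.2 == l)),
    pv_proj, pv_k_toNat]
  simp only [pvWords]
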